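-- pv_equiv track=rewrite | github.com/4shw4n1/matplotlib-projects | wisteria.py | wisteria
-- ===== SOURCE A (Python) =====
-- def wisteria(x):
--         temp = x
--         product_of_digits = 1
--         while temp > 0:
--                 rem = temp % 10
--                 if rem == 0:
--                         pass
--                 else:
--                         product_of_digits *= rem
--                 temp //= 10
--         output = x - product_of_digits
--         return output
-- ===== SOURCE B (Python) =====
-- def wisteria(x):
--     product = 1
--     if x > 0:
--         s = str(x)
--         for d in range(2, 10):
--             product *= d ** s.count(str(d))
--     return x - product
-- ===== Notes on version B (the rewrite author's own statement) =====
-- stated objective: alternative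
-- what changed: B never multiplies digit by digit: it counts the occurrences of each symbol '2'..'9' in str(x) and forms the product of fixed powers d ** count, instead of A's least-significant-first modulo/floor-division loop multiplying each nonzero remainder.
import Mathlib
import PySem

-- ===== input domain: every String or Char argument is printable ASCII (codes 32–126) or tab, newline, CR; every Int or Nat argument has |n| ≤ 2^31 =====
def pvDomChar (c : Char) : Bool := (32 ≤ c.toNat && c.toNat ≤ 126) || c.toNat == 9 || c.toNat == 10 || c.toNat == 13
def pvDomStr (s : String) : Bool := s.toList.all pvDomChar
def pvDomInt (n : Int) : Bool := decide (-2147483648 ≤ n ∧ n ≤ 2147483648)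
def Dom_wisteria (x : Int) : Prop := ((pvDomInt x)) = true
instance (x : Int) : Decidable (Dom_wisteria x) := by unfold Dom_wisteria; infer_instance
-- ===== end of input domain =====

-- B replaces A's digit-by-digit multiply loop by a different strategy: count the
-- occurrences of each symbol '2'..'9' in str(x) and multiply the powers d ** count.


-- ===== PORT A =====
-- the 'while temp > 0' loop, carrying (temp, product_of_digits)
def wisteriaLoop (temp prod : Int) : Int :=
  if _h : temp > 0 then
    let rem := PySem.Int.mod temp 10
    wisteriaLoop (PySem.Int.floordiv temp 10) (if rem = 0 then prod else prod * rem)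
  else prod
termination_by temp.toNat
decreasing_by
  simp only [PySem.Int.floordiv]
  have : temp.fdiv 10 = temp / 10 := by rw [Int.fdiv_eq_ediv]; norm_num
  omega

def wisteria (x : Int) : Int :=
  x - wisteriaLoop x 1

-- ===== PORT B =====
-- body of B's 'for d in range(2, 10)' loop: product *= d ** s.count(str(d))
def wisteriaAltStep (s : String) (p d : Int) : Int :=
  p * d ^ PySem.Str.count s (PySem.Int.toStr d)

def wisteria_alt (x : Int) : Int :=
  let product :=
    if x > 0 then
      (PySem.List.pyRange 2 10 1).foldl (wisteriaAltStep (PySem.Int.toStr x)) 1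
    else 1
  x - product

-- ===== PRECONDITION & SPEC =====
def Spec_wisteria (x : Int) (out : Int) : Prop := out = wisteria_alt x
instance (x : Int) (out : Int) : Decidable (Spec_wisteria x out) := by unfold Spec_wisteria; infer_instance

-- ===== CLAIM (what is proved, stated in full; the proofs are below) =====
def Claim_equal_wisteria : Prop := ∀ (x : Int), Dom_wisteria x → Spec_wisteria x (wisteria x)

-- ===== LEMMAS AND PROOFS =====

-- product of the nonzero decimal digits of n
def digitProd (n : Nat) : Int :=
  if n = 0 then 1
  else (if n % 10 = 0 then 1 else ((n % 10 : Nat) : Int)) * digitProd (n / 10)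
decreasing_by omega

-- the decimal character string of n (for n ≥ 10 built from that of n / 10)
def decChars (n : Nat) : List Char :=
  if _h : n < 10 then [Nat.digitChar n]
  else decChars (n / 10) ++ [Nat.digitChar (n % 10)]
decreasing_by omega

-- 2^(#'2') * 3^(#'3') * … * 9^(#'9'): the value B's count-and-power pass computes on a digit string
def nzPow (L : List Char) : Int :=
  2 ^ L.count '2' * 3 ^ L.count '3' * 4 ^ L.count '4' * 5 ^ L.count '5' *
    6 ^ L.count '6' * 7 ^ L.count '7' * 8 ^ L.count '8' * 9 ^ L.count '9'

theorem toDigitsCore_eq (f : Nat) : ∀ (n : Nat) (acc : List Char), n < f →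
    Nat.toDigitsCore 10 f n acc = decChars n ++ acc := by
  induction f with
  | zero => intro n acc h; omega
  | succ f ih =>
    intro n acc h
    rw [Nat.toDigitsCore]
    by_cases h10 : n < 10
    · have hd : n / 10 = 0 := by omega
      have hm : n % 10 = n := Nat.mod_eq_of_lt h10
      simp only [hd, hm, if_pos]
      rw [decChars]
      simp [h10]
    · have hne : ¬ n / 10 = 0 := by omega
      simp only [hne, if_false]
      rw [ih (n / 10) _ (by omega)]
      conv_rhs => rw [decChars]
      simp [h10]

theorem wisteriaLoop_eq (temp p : Int) :
    wisteriaLoop temp p = p * digitProd temp.toNat := by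
  induction temp, p using wisteriaLoop.induct with
  | case1 temp p hpos rem ih =>
    rw [wisteriaLoop]
    simp only [hpos, dif_pos]
    simp only [dite_eq_ite] at ih
    rw [show rem = PySem.Int.mod temp 10 from rfl] at ih
    rw [ih]
    have h10 : (PySem.Int.floordiv temp 10) = temp / 10 := by
      simp only [PySem.Int.floordiv]
      rw [Int.fdiv_eq_ediv]; norm_num
    have hmod : PySem.Int.mod temp 10 = temp % 10 := by
      simp only [PySem.Int.mod]
      rw [Int.fmod_eq_emod]; norm_num
    have hdiv_toNat : ((PySem.Int.floordiv temp 10)).toNat = temp.toNat / 10 := by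
      rw [h10]; omega
    rw [hmod, hdiv_toNat]
    conv_rhs => rw [digitProd]
    have h0 : ¬ temp.toNat = 0 := by omega
    simp only [h0, if_false]
    have hmc : temp % 10 = ((temp.toNat % 10 : Nat) : Int) := by omega
    rw [hmc]
    by_cases hz : temp.toNat % 10 = 0
    · simp [hz]
    · have hzi : ((temp.toNat % 10 : Nat) : Int) ≠ 0 := by exact_mod_cast hz
      simp only [hzi, hz, if_neg, not_false_iff]
      ring
  | case2 temp p hpos =>
    rw [wisteriaLoop]
    simp only [hpos, dif_neg, not_false_iff]
    have h0 : temp.toNat = 0 := by omega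
    simp [h0, digitProd]

-- Chars.count.go on a one-character pattern is a plain character count
theorem countGo_single (c : Char) : ∀ (l : List Char) (fuel acc : Nat), l.length ≤ fuel →
    PySem.Chars.count.go [c] fuel l acc = acc + l.count c := by
  intro l
  induction l with
  | nil =>
    intro fuel acc _
    cases fuel <;> simp [PySem.Chars.count.go]
  | cons h t ih =>
    intro fuel acc hf
    simp only [List.length_cons] at hf
    cases fuel with
    | zero => omega
    | succ f =>
      rw [PySem.Chars.count.go]
      by_cases hc : c = h
      · subst hc
        have hp : [c].isPrefixOf (c :: t) = true := by simp [List.isPrefixOf]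
        simp only [hp, if_pos, List.length_singleton, List.drop_one, List.tail_cons]
        rw [ih f (acc + 1) (by omega)]
        simp
        omega
      · have hp : ¬ ([c].isPrefixOf (h :: t) = true) := by
          simp [List.isPrefixOf]; tauto
        simp only [hp]
        rw [ih f acc (by omega)]
        simp [List.count_cons]; tauto

theorem count_single (l : List Char) (c : Char) :
    PySem.Chars.count l [c] = l.count c := by
  rw [PySem.Chars.count]
  simp only [List.isEmpty_cons]
  rw [countGo_single c l l.length 0 (le_refl _)]
  simp

-- B's foldl over range(2, 10) computes nzPow of the string's characters
theorem alt_product_eq (s : String) :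
    (PySem.List.pyRange 2 10 1).foldl (wisteriaAltStep s) 1 = nzPow s.toList := by
  have hr : PySem.List.pyRange 2 10 1 = [2, 3, 4, 5, 6, 7, 8, 9] := by decide
  rw [hr]
  simp only [List.foldl, wisteriaAltStep, PySem.Str.count_eq]
  have h2 : (PySem.Int.toStr 2).toList = ['2'] := by decide
  have h3 : (PySem.Int.toStr 3).toList = ['3'] := by decide
  have h4 : (PySem.Int.toStr 4).toList = ['4'] := by decide
  have h5 : (PySem.Int.toStr 5).toList = ['5'] := by decide
  have h6 : (PySem.Int.toStr 6).toList = ['6'] := by decide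
  have h7 : (PySem.Int.toStr 7).toList = ['7'] := by decide
  have h8 : (PySem.Int.toStr 8).toList = ['8'] := by decide
  have h9 : (PySem.Int.toStr 9).toList = ['9'] := by decide
  rw [h2, h3, h4, h5, h6, h7, h8, h9]
  simp only [count_single]
  unfold nzPow
  ring

theorem nzPow_append_singleton (L : List Char) (c : Char) :
    nzPow (L ++ [c]) = nzPow L * nzPow [c] := by
  simp [nzPow, List.count_append, pow_add]
  ring

theorem nzPow_digitChar {d : Nat} (h : d < 10) :
    nzPow [Nat.digitChar d] = if d = 0 then 1 else ((d : Nat) : Int) := by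
  interval_cases d <;> simp [nzPow] <;> decide

theorem nzPow_decChars (n : Nat) : nzPow (decChars n) = digitProd n := by
  induction n using Nat.strong_induction_on with
  | _ n ih =>
    by_cases h10 : n < 10
    · rw [decChars]
      simp only [h10, dif_pos]
      rw [nzPow_digitChar h10]
      by_cases h0 : n = 0
      · rw [digitProd]; simp [h0]
      · rw [digitProd]
        have hd : n / 10 = 0 := by omega
        rw [hd, Nat.mod_eq_of_lt h10, digitProd]
        simp [h0]
    · rw [decChars]
      simp only [h10, dif_neg, not_false_iff]
      rw [nzPow_append_singleton, ih (n / 10) (by omega),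
        nzPow_digitChar (Nat.mod_lt _ (by norm_num))]
      conv_rhs => rw [digitProd]
      have h0 : ¬ n = 0 := by omega
      simp only [h0, if_false]
      ring

-- ===== VERDICT (by name: the statement is the Claim_ definition above) =====
theorem wisteria_spec : Claim_equal_wisteria := by
  intro x _
  unfold Spec_wisteria wisteria wisteria_alt
  rw [wisteriaLoop_eq x 1]
  by_cases hpos : x > 0
  · simp only [hpos, if_pos]
    rw [alt_product_eq]
    have hx0 : ¬ x < 0 := by omega
    have ht : (PySem.Int.toStr x).toList = decChars x.toNat := by
      simp only [PySem.Int.toStr, PySem.Int.toChars, hx0, if_neg, not_false_iff]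
      rw [String.toList_ofList, Nat.toDigits, toDigitsCore_eq _ _ _ (by omega),
        List.append_nil]
    rw [ht, nzPow_decChars]
    ring
  · simp only [hpos, if_neg, not_false_iff]
    have h0 : x.toNat = 0 := by omega
    simp [h0, digitProd]
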